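-- pv_equiv track=rewrite | github.com/gaomc111/GraduationProject | BaselineTest/upd_md.py | delete_columns
-- ===== SOURCE A (Python) =====
-- def delete_columns(markdown_table, columns_to_delete):
--     """
--     删除Markdown表格中指定的列，返回删除后的表格
--
--     参数:
--         markdown_table (str): 原始Markdown表格字符串
--         columns_to_delete (list): 要删除的列名列表
--
--     返回:
--         str: 删除指定列后的Markdown表格
--     """
--     lines = markdown_table.strip().split('\n')
--     if len(lines) < 2:
--         return markdown_table
--
--     # 解析表头
--     header_line = lines[0]
--     header_parts = [part.strip() for part in header_line.split('|')[1:-1]]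
--
--     # 解析分隔线
--     separator_line = lines[1]
--     separator_parts = [part.strip() for part in separator_line.split('|')[1:-1]]
--
--     # 确定要保留的列索引
--     columns_to_keep_indices = []
--     for i, col_name in enumerate(header_parts):
--         if col_name not in columns_to_delete:
--             columns_to_keep_indices.append(i)
--
--     # 处理每一行
--     new_table = []
--     for line in lines:
--         parts = [part.strip() for part in line.split('|')[1:-1]]
--         if len(parts) != len(header_parts):
--             continue  # 跳过格式不正确的行
--
--         # 只保留需要的列
--         new_parts = [parts[i] for i in columns_to_keep_indices]
--         new_line = '| ' + ' | '.join(new_parts) + ' |'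
--         new_table.append(new_line)
--
--     return '\n'.join(new_table)
-- ===== SOURCE B (Python) =====
-- def delete_columns(markdown_table, columns_to_delete):
--     """Column-major algorithm: materialize each kept column as a list (filtering
--     whole columns by their header cell), then reassemble every row from the
--     surviving columns.  A works row-major with a precomputed index list; B never
--     touches indices of cells within a row other than through whole columns."""
--     lines = markdown_table.strip().split('\n')
--     if len(lines) < 2:
--         return markdown_table
--     header_parts = [p.strip() for p in lines[0].split('|')[1:-1]]
--     rows = [parts for parts in
--             ([p.strip() for p in line.split('|')[1:-1]] for line in lines)
--             if len(parts) == len(header_parts)]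
--     cols = []
--     for j in range(len(header_parts)):
--         col = [row[j] for row in rows]
--         if col[0] not in columns_to_delete:
--             cols.append(col)
--     return '\n'.join('| ' + ' | '.join(col[k] for col in cols) + ' |'
--                      for k in range(len(rows)))
-- ===== Notes on version B (the rewrite author's own statement) =====
-- stated objective: alternative
-- what changed: B is column-major: it materializes each column of the parsed table as its own list, filters whole columns by their header cell, and then reassembles every output row from the surviving column lists, instead of A's row-major pass that projects each row through a precomputed keep-index list.
import Mathlib
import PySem

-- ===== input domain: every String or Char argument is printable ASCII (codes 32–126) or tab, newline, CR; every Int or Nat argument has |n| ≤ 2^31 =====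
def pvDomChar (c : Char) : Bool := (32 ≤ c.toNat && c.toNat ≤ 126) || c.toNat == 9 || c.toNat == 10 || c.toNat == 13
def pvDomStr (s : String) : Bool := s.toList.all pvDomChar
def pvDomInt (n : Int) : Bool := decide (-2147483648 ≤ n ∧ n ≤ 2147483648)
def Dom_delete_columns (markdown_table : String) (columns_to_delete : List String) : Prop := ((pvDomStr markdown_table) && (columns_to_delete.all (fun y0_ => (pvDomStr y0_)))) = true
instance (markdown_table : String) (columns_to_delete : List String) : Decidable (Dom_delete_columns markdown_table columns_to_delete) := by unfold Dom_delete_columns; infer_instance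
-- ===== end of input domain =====

-- B is a column-major alternative: it materializes each kept column as its own list (filtering
-- whole columns by their header cell) and then reassembles every row from the surviving columns,
-- instead of A's row-major pass that projects each row through a precomputed keep-index list.

-- s.split(sep): PySem.Str.split? is none only for sep = ""; both ports call it only with the
-- nonempty literals "\n" and "|", where it is exact.
def pvSplit (s sep : String) : List String := (PySem.Str.split? s sep).getD []

-- [part.strip() for part in line.split('|')[1:-1]]  (the cell parser both Pythons contain verbatim)
def pvParts (line : String) : List String :=
  (PySem.List.slice (pvSplit line "|") (some 1) (some (-1))).map (fun p => PySem.Str.strip p)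

-- ===== PORT A =====
def delete_columns (markdown_table : String) (columns_to_delete : List String) : String :=
  let lines := pvSplit (PySem.Str.strip markdown_table) "\n"
  if lines.length < 2 then markdown_table
  else
    let header_line := PySem.List.pyGetD lines 0 ""
    let header_parts := pvParts header_line
    let separator_line := PySem.List.pyGetD lines 1 ""
    let _separator_parts := pvParts separator_line   -- computed and unused, as in A
    let columns_to_keep_indices := (PySem.List.enumerate header_parts).foldl
      (fun acc p => if !(columns_to_delete.contains p.2) then acc ++ [p.1] else acc) []
    let new_table := lines.foldl (fun acc line =>
      let parts := pvParts line
      if parts.length != header_parts.length then acc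
      else acc ++ ["| " ++ PySem.Str.join " | "
        (columns_to_keep_indices.map (fun i => PySem.List.pyGetD parts i "")) ++ " |"]) []
    PySem.Str.join "\n" new_table

-- ===== PORT B =====
def delete_columns_alt (markdown_table : String) (columns_to_delete : List String) : String :=
  let lines := pvSplit (PySem.Str.strip markdown_table) "\n"
  if lines.length < 2 then markdown_table
  else
    let header_parts := pvParts (PySem.List.pyGetD lines 0 "")
    let rows := (lines.map pvParts).filter (fun ps => ps.length == header_parts.length)
    let cols := (PySem.List.pyRange 0 header_parts.length 1).foldl (fun acc j =>
      let col := rows.map (fun row => PySem.List.pyGetD row j "")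
      if !(columns_to_delete.contains (PySem.List.pyGetD col 0 "")) then acc ++ [col] else acc) []
    PySem.Str.join "\n" ((PySem.List.pyRange 0 rows.length 1).map (fun k =>
      "| " ++ PySem.Str.join " | " (cols.map (fun col => PySem.List.pyGetD col k "")) ++ " |"))

-- ===== PRECONDITION & SPEC =====
def Spec_delete_columns (markdown_table : String) (columns_to_delete : List String) (out : String) : Prop := out = delete_columns_alt markdown_table columns_to_delete
instance (markdown_table : String) (columns_to_delete : List String) (out : String) : Decidable (Spec_delete_columns markdown_table columns_to_delete out) := by unfold Spec_delete_columns; infer_instance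

-- ===== CLAIM (what is proved, stated in full; the proofs are below) =====
def Claim_equal_delete_columns : Prop := ∀ (markdown_table : String) (columns_to_delete : List String), Dom_delete_columns markdown_table columns_to_delete → Spec_delete_columns markdown_table columns_to_delete (delete_columns markdown_table columns_to_delete)

-- ===== LEMMAS AND PROOFS =====

-- a loop that SKIPS on p and appends f x otherwise is filter (!p) then map f
theorem pv_foldl_skip {α β : Type} (p : α → Bool) (f : α → β) (l : List α) :
    l.foldl (fun acc x => if p x = true then acc else acc ++ [f x]) [] =
      (l.filter (fun x => !p x)).map f := by
  have h : (fun (acc : List β) x => if p x = true then acc else acc ++ [f x])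
      = (fun acc x => if (!p x) = true then acc ++ [f x] else acc) := by
    funext acc x; by_cases hx : p x = true <;> simp [hx]
  rw [h, PySem.List.foldl_append_if]; simp

-- reassembling the rows from materialized columns (B's second stage, iterated over row indices)
-- is the row-major projection of each row through the kept indices (A's per-row map)
theorem pv_colrow (rows : List (List String)) (kI : List Int) :
    (PySem.List.pyRange 0 (rows.length : Int)).map (fun k => "| " ++ PySem.Str.join " | "
        (kI.map (fun j => PySem.List.pyGetD (rows.map (fun r => PySem.List.pyGetD r j "")) k "")) ++ " |")
      = rows.map (fun r => "| " ++ PySem.Str.join " | "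
        (kI.map (fun j => PySem.List.pyGetD r j "")) ++ " |") := by
  conv_rhs => rw [← PySem.List.map_pyGetD_pyRange_zero' rows []]
  rw [List.map_map]
  apply List.map_congr_left
  intro k hk
  rw [PySem.List.mem_pyRange_one] at hk
  simp only [Function.comp_def]
  refine congrArg (fun z => "| " ++ PySem.Str.join " | " z ++ " |") ?_
  apply List.map_congr_left
  intro j _
  rw [PySem.List.pyGetD_eq_getElem _ "" hk.1 (by simpa using hk.2),
    PySem.List.pyGetD_eq_getElem _ [] hk.1 hk.2, List.getElem_map]

theorem delete_columns_eq (mt : String) (cd : List String) :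
    delete_columns mt cd = delete_columns_alt mt cd := by
  unfold delete_columns delete_columns_alt
  by_cases hlen : (pvSplit (PySem.Str.strip mt) "\n").length < 2
  · rw [if_pos hlen, if_pos hlen]
  · rw [if_neg hlen, if_neg hlen]
    rcases hL : pvSplit (PySem.Str.strip mt) "\n" with _ | ⟨l0, tl⟩
    · rw [hL] at hlen; simp at hlen
    · simp only [PySem.List.pyGetD_zero_cons, pv_foldl_skip, PySem.List.foldl_append_if,
        List.nil_append, bne, Bool.not_not]
      rw [PySem.List.enumerate_eq_map_pyRange (pvParts l0) ""]
      simp only [PySem.List.len_eq, List.filter_map, List.map_map, Function.comp_def,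
        List.filter_cons, beq_self_eq_true, if_true, List.map_cons, PySem.List.pyGetD_zero_cons]
      have hcell : ∀ (x : Int),
          (PySem.List.pyGetD (pvParts l0) x "" ::
            List.map (fun x1 => PySem.List.pyGetD (pvParts x1) x "")
              (List.filter (fun x => (pvParts x).length == (pvParts l0).length) tl))
          = (pvParts l0 :: (List.filter (fun x => (pvParts x).length == (pvParts l0).length) tl).map pvParts).map
              (fun r => PySem.List.pyGetD r x "") := by
        intro x; simp [List.map_map, Function.comp_def]
      simp only [hcell]
      rw [pv_colrow]
      simp [List.map_map, Function.comp_def]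

-- ===== VERDICT (by name: the statement is the Claim_ definition above) =====
theorem delete_columns_spec : Claim_equal_delete_columns := by
  intro markdown_table columns_to_delete _
  unfold Spec_delete_columns
  exact delete_columns_eq markdown_table columns_to_delete
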